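-- pv_equiv track=rewrite | github.com/stonedingwt/HYSys | src/backend/mep/core/documents/generic_handler.py | _group_tables_by_article
-- ===== SOURCE A (Python) =====
-- def _group_tables_by_article(tables: list) -> list:
--     groups: list = []
--     current: list = []
--     for table in tables:
--         headers = table.get('Headers', [])
--         first_header = headers[0] if headers else ''
--         if 'Article Information' in first_header:
--             if current:
--                 groups.append(current)
--             current = [table]
--         elif current:
--             current.append(table)
--     if current:
--         groups.append(current)
--     return groups
-- ===== SOURCE B (Python) =====
-- def _group_tables_by_article(tables: list) -> list:
--     def is_boundary(t):
--         headers = t.get('Headers', [])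
--         return 'Article Information' in (headers[0] if headers else '')
--     starts = [i for i, t in enumerate(tables) if is_boundary(t)]
--     ends = starts[1:] + [len(tables)]
--     return [tables[s:e] for s, e in zip(starts, ends)]
-- ===== Notes on version B (the rewrite author's own statement) =====
-- stated objective: alternative
-- what changed: Replaces the stateful accumulator loop (groups/current lists mutated per table) by an index-then-slice decomposition: one pass collects the boundary indices, then the groups are the slices between consecutive boundaries (last slice runs to the end).
import Mathlib
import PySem

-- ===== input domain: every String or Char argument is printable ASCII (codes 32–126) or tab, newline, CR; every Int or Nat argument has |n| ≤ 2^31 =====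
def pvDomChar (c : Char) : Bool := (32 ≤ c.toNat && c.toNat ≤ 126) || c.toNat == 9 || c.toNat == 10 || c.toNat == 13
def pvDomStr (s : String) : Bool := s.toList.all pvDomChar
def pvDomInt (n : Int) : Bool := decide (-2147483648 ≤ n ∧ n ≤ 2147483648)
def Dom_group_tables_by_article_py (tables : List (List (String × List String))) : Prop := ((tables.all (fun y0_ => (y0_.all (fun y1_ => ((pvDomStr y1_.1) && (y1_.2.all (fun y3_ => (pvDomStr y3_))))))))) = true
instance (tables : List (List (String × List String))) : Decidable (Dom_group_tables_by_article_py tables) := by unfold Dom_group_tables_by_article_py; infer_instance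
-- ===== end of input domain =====

-- B replaces A's stateful groups/current accumulator loop by a two-pass index-then-slice
-- decomposition (collect boundary indices, then slice between consecutive boundaries); same cost.


-- Shared boundary test (A inlines these two lines; B's Python has the same two lines as its
-- local helper is_boundary): table.get('Headers', []) is first-match lookup on the association
-- list, first_header = headers[0] if headers else '', then Python's substring test 'in'.
def pvIsBoundary (t : List (String × List String)) : Bool :=
  let headers := (List.find? (fun p => p.1 == "Headers") t).elim [] Prod.snd
  let first_header := match headers with | [] => "" | h :: _ => h
  PySem.Str.isIn "Article Information" first_header

-- ===== PORT A =====
-- fold state = (groups, current); after the loop, a nonempty current is appended.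
def group_tables_by_article_py (tables : List (List (String × List String))) : List (List (List (String × List String))) :=
  let st := tables.foldl
    (fun acc table =>
      if pvIsBoundary table then
        ((if acc.2.isEmpty then acc.1 else acc.1 ++ [acc.2]), [table])
      else if acc.2.isEmpty then acc
      else (acc.1, acc.2 ++ [table]))
    ([], [])
  if st.2.isEmpty then st.1 else st.1 ++ [st.2]

-- ===== PORT B =====
-- starts = boundary indices; ends = starts[1:] + [len(tables)]; groups = slices between them.
def group_tables_by_article_py_alt (tables : List (List (String × List String))) : List (List (List (String × List String))) :=
  let starts := (PySem.List.enumerate tables).filterMap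
    (fun it => if pvIsBoundary it.2 then some it.1 else none)
  let ends := starts.drop 1 ++ [(tables.length : Int)]
  (starts.zip ends).map (fun se => PySem.List.slice tables (some se.1) (some se.2))

-- ===== PRECONDITION & SPEC =====
def Spec_group_tables_by_article_py (tables : List (List (String × List String))) (out : List (List (List (String × List String)))) : Prop := out = group_tables_by_article_py_alt tables
instance (tables : List (List (String × List String))) (out : List (List (List (String × List String)))) : Decidable (Spec_group_tables_by_article_py tables out) := by unfold Spec_group_tables_by_article_py; infer_instance

-- ===== CLAIM (what is proved, stated in full; the proofs are below) =====
def Claim_equal_group_tables_by_article_py : Prop := ∀ (tables : List (List (String × List String))), Dom_group_tables_by_article_py tables → Spec_group_tables_by_article_py tables (group_tables_by_article_py tables)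

-- ===== LEMMAS AND PROOFS =====

-- A common recursive characterisation: each group is a boundary element together with the
-- run of non-boundary elements after it; elements before the first boundary are dropped.
def gbaSpec {α : Type} (p : α → Bool) : List α → List (List α)
  | [] => []
  | t :: ts =>
      if p t then (t :: ts.takeWhile (fun x => !p x)) :: gbaSpec p (ts.dropWhile (fun x => !p x))
      else gbaSpec p ts
termination_by l => l.length
decreasing_by
  · have := List.length_dropWhile_le (fun x => !p x) ts; simp; omega
  · simp

theorem gbaSpec_dropWhile {α : Type} (p : α → Bool) (ts : List α) :
    gbaSpec p (ts.dropWhile (fun x => !p x)) = gbaSpec p ts := by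
  induction ts with
  | nil => rfl
  | cons t ts ih =>
    by_cases hp : p t
    · simp [List.dropWhile, hp]
    · simp only [List.dropWhile, hp, Bool.not_false, ih]
      simp [gbaSpec, hp]

-- ---- A-side ----
def stepA {α : Type} (p : α → Bool) (acc : List (List α) × List α) (t : α) : List (List α) × List α :=
  if p t then ((if acc.2.isEmpty then acc.1 else acc.1 ++ [acc.2]), [t])
  else if acc.2.isEmpty then acc
  else (acc.1, acc.2 ++ [t])

def finA {α : Type} (st : List (List α) × List α) : List (List α) :=
  if st.2.isEmpty then st.1 else st.1 ++ [st.2]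

theorem finA_foldl_acc {α : Type} (p : α → Bool) (ts : List α) (gs : List (List α)) (cur : List α) :
    finA (ts.foldl (stepA p) (gs, cur)) = gs ++ finA (ts.foldl (stepA p) ([], cur)) := by
  induction ts generalizing gs cur with
  | nil => by_cases h : cur.isEmpty <;> simp [finA, h]
  | cons t ts ih =>
    simp only [List.foldl_cons, stepA]
    by_cases hp : p t <;> by_cases hc : cur.isEmpty <;>
      simp only [hp, hc, if_true, if_false, Bool.false_eq_true, List.nil_append]
    · exact ih gs [t]
    · rw [ih (gs ++ [cur]) [t], ih [cur] [t], List.append_assoc]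
    · exact ih gs cur
    · exact ih gs (cur ++ [t])

theorem finA_foldl_nonempty {α : Type} (p : α → Bool) (ts : List α) (cur : List α) (hc : cur ≠ []) :
    finA (ts.foldl (stepA p) ([], cur)) =
      (cur ++ ts.takeWhile (fun x => !p x)) :: gbaSpec p (ts.dropWhile (fun x => !p x)) := by
  induction ts generalizing cur with
  | nil => simp [finA, hc, gbaSpec]
  | cons t ts ih =>
    have hce : cur.isEmpty = false := by simpa using hc
    by_cases hp : p t
    · simp only [List.foldl_cons, stepA, hp, if_true, hce, Bool.false_eq_true, if_false]
      rw [finA_foldl_acc, ih [t] (by simp)]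
      simp [gbaSpec, List.takeWhile, List.dropWhile, hp]
    · simp only [List.foldl_cons, stepA, hp, Bool.false_eq_true, if_false, hce]
      rw [ih (cur ++ [t]) (by simp)]
      simp [List.takeWhile, List.dropWhile, hp]

theorem A_eq_gbaSpec {α : Type} (p : α → Bool) (ts : List α) :
    finA (ts.foldl (stepA p) ([], [])) = gbaSpec p ts := by
  induction ts with
  | nil => simp [finA, gbaSpec]
  | cons t ts ih =>
    by_cases hp : p t
    · simp only [List.foldl_cons, stepA, hp, if_true, List.isEmpty_nil]
      rw [finA_foldl_nonempty p ts [t] (by simp)]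
      simp [gbaSpec, hp]
    · simp only [List.foldl_cons, stepA, hp, Bool.false_eq_true, if_false, List.isEmpty_nil, if_true]
      rw [ih]; simp [gbaSpec, hp]

-- ---- B-side ----
def startsB {α : Type} (p : α → Bool) (i : Int) (ts : List α) : List Int :=
  (PySem.List.enumerate ts i).filterMap (fun it => if p it.2 then some it.1 else none)

def buildB {α : Type} (base : List α) (S : List Int) (L : Int) : List (List α) :=
  (S.zip (S.drop 1 ++ [L])).map (fun se => PySem.List.slice base (some se.1) (some se.2))

theorem startsB_cons {α : Type} (p : α → Bool) (i : Int) (t : α) (ts : List α) :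
    startsB p i (t :: ts) = (if p t then [i] else []) ++ startsB p (i + 1) ts := by
  by_cases hp : p t <;> simp [startsB, PySem.List.enumerate_cons, hp]

theorem startsB_shift {α : Type} (p : α → Bool) (i : Int) (ts : List α) :
    startsB p i ts = (startsB p 0 ts).map (· + i) := by
  induction ts generalizing i with
  | nil => simp [startsB]
  | cons t ts ih =>
    rw [startsB_cons, startsB_cons, ih (i + 1), ih (0 + 1)]
    by_cases hp : p t <;> simp [hp, List.map_map] <;>
      · intro a _; omega

theorem startsB_cons_zero {α : Type} (p : α → Bool) (t : α) (ts : List α) :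
    startsB p 0 (t :: ts) = (if p t then [0] else []) ++ (startsB p 0 ts).map (· + 1) := by
  rw [startsB_cons, startsB_shift]
  norm_num

theorem mem_startsB_zero {α : Type} (p : α → Bool) (ts : List α) (s : Int) (hs : s ∈ startsB p 0 ts) :
    0 ≤ s ∧ s < ts.length := by
  induction ts generalizing s with
  | nil => simp [startsB] at hs
  | cons t ts ih =>
    rw [startsB_cons_zero] at hs
    simp only [List.mem_append, List.mem_map] at hs
    rcases hs with hs | ⟨a, ha, rfl⟩
    · by_cases hp : p t <;> simp [hp] at hs
      subst hs
      constructor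
      · omega
      · simp
    · have := ih a ha; simp; omega

theorem startsB_zero_nil {α : Type} (p : α → Bool) (ts : List α) (h : startsB p 0 ts = []) :
    ts.takeWhile (fun x => !p x) = ts ∧ ts.dropWhile (fun x => !p x) = [] := by
  induction ts with
  | nil => simp
  | cons t ts ih =>
    rw [startsB_cons_zero] at h
    by_cases hp : p t
    · simp [hp] at h
    · simp [hp] at h
      have := ih h
      simp [List.takeWhile, List.dropWhile, hp, this]

theorem startsB_zero_head {α : Type} (p : α → Bool) (ts : List α) (s : Int) (rest : List Int)
    (h : startsB p 0 ts = s :: rest) : s = ((ts.takeWhile (fun x => !p x)).length : Int) := by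
  induction ts generalizing s rest with
  | nil => simp [startsB] at h
  | cons t ts ih =>
    rw [startsB_cons_zero] at h
    by_cases hp : p t
    · simp [hp] at h
      simp [List.takeWhile, hp, ← h.1]
    · simp [hp] at h
      cases h' : startsB p 0 ts with
      | nil => rw [h'] at h; simp at h
      | cons s' rest' =>
        rw [h'] at h; simp at h
        have := ih s' rest' h'
        simp [List.takeWhile, hp]
        omega

theorem slice_cons_succ {α : Type} (t : α) (ts : List α) (s e : Int) (hs : 0 ≤ s) (he : 0 ≤ e) :
    PySem.List.slice (t :: ts) (some (s + 1)) (some (e + 1)) = PySem.List.slice ts (some s) (some e) := by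
  rw [PySem.List.slice_toNat _ (by omega) (by omega), PySem.List.slice_toNat _ hs he]
  have h1 : (s + 1).toNat = s.toNat + 1 := by omega
  have h2 : (e + 1).toNat = e.toNat + 1 := by omega
  simp [h1, h2]

theorem buildB_shift {α : Type} (p : α → Bool) (t : α) (ts : List α) :
    buildB (t :: ts) ((startsB p 0 ts).map (· + 1)) ((ts.length : Int) + 1) =
      buildB ts (startsB p 0 ts) (ts.length : Int) := by
  unfold buildB
  have hone : [(ts.length : Int) + 1] = List.map (· + 1) [(ts.length : Int)] := rfl
  rw [← List.map_drop, hone, ← List.map_append, List.zip_map, List.map_map]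
  apply List.map_congr_left
  intro se hse
  rcases se with ⟨s, e⟩
  obtain ⟨h1, h2⟩ := List.of_mem_zip hse
  have hs : 0 ≤ s := (mem_startsB_zero p ts s h1).1
  have he : 0 ≤ e := by
    rcases List.mem_append.mp h2 with h | h
    · exact (mem_startsB_zero p ts e (List.mem_of_mem_drop h)).1
    · simp at h; omega
  simpa using slice_cons_succ t ts s e hs he

theorem B_eq_gbaSpec {α : Type} (p : α → Bool) (ts : List α) :
    buildB ts (startsB p 0 ts) (ts.length : Int) = gbaSpec p ts := by
  induction ts with
  | nil => simp [buildB, startsB, gbaSpec, PySem.List.enumerate_nil]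
  | cons t ts ih =>
    have hL : (((t :: ts).length : Nat) : Int) = (ts.length : Int) + 1 := by
      simp [List.length_cons]
    by_cases hp : p t
    · -- head is a boundary: first slice is t followed by the run of non-boundaries
      rw [startsB_cons_zero]
      simp only [hp, if_true, List.singleton_append]
      cases hS : startsB p 0 ts with
      | nil =>
        -- no further boundary: the single group is the whole list
        obtain ⟨htw, hdw⟩ := startsB_zero_nil p ts hS
        unfold buildB
        simp only [List.map_nil, List.drop_succ_cons, List.drop_nil, List.nil_append,
          List.zip_cons_cons, List.zip_nil_right, List.map_cons, List.map_nil, hL]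
        rw [PySem.List.slice_toNat _ (by omega) (by omega)]
        have h1 : ((ts.length : Int) + 1).toNat = ts.length + 1 := by omega
        simp [h1, gbaSpec, hp, htw, hdw]
      | cons s1 rest =>
        have hs1 : 0 ≤ s1 := by
          have hmem : s1 ∈ startsB p 0 ts := by rw [hS]; exact List.mem_cons_self ..
          exact (mem_startsB_zero p ts s1 hmem).1
        have hhead : s1 = ((ts.takeWhile (fun x => !p x)).length : Int) :=
          startsB_zero_head p ts s1 rest hS
        have hshift : buildB (t :: ts) ((s1 :: rest).map (· + 1)) ((ts.length : Int) + 1) =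
            buildB ts (s1 :: rest) (ts.length : Int) := by
          rw [← hS]; exact buildB_shift p t ts
        have ih' : buildB ts (s1 :: rest) (ts.length : Int) = gbaSpec p ts := by
          rw [← hS]; exact ih
        -- split off the first zip pair, then shift the rest down onto ts
        have hsplit : buildB (t :: ts) (0 :: (s1 :: rest).map (· + 1)) ((ts.length : Int) + 1) =
            PySem.List.slice (t :: ts) (some 0) (some (s1 + 1)) ::
              buildB (t :: ts) ((s1 :: rest).map (· + 1)) ((ts.length : Int) + 1) := by
          unfold buildB
          simp [List.zip_cons_cons]
        have hslice : PySem.List.slice (t :: ts) (some 0) (some (s1 + 1)) =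
            t :: ts.takeWhile (fun x => !p x) := by
          rw [PySem.List.slice_toNat _ (by omega) (by omega)]
          have h1 : (s1 + 1).toNat = (ts.takeWhile (fun x => !p x)).length + 1 := by omega
          have h2 : List.take ((ts.takeWhile (fun x => !p x)).length) ts =
              ts.takeWhile (fun x => !p x) :=
            (List.prefix_iff_eq_take.mp (List.takeWhile_prefix _)).symm
          simp [h1, h2]
        rw [hL, hsplit, hshift, ih', hslice, ← gbaSpec_dropWhile p ts]
        simp [gbaSpec, hp]
    · -- head is not a boundary: it belongs to no group; everything shifts down onto ts
      rw [startsB_cons_zero]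
      simp only [hp, if_false, Bool.false_eq_true, List.nil_append]
      rw [hL, buildB_shift, ih]
      simp [gbaSpec, hp]

-- ===== VERDICT (by name: the statement is the Claim_ definition above) =====
theorem group_tables_by_article_py_spec : Claim_equal_group_tables_by_article_py := by
  intro tables _
  unfold Spec_group_tables_by_article_py
  have hA : group_tables_by_article_py tables =
      finA (tables.foldl (stepA pvIsBoundary) ([], [])) := rfl
  have hB : group_tables_by_article_py_alt tables =
      buildB tables (startsB pvIsBoundary 0 tables) (tables.length : Int) := rfl
  rw [hA, hB, A_eq_gbaSpec, B_eq_gbaSpec]
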